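-- pv_equiv track=rewrite | github.com/skyblue38/JBA_CorePython_RegexEngine | Regex Engine/task/regex/regex.py | re_test
-- ===== SOURCE A (Python) =====
-- def re_test(rx, sx):
--     if rx == '':
--         return True
--     if sx == '':
--         return False
--     if rx[0] == sx[0] or rx[0] == '.':
--         return re_test(rx[1:], sx[1:])
--     return False
-- ===== SOURCE B (Python) =====
-- def re_test(rx, sx):
--     if len(rx) > len(sx):
--         return False
--     return all(p == '.' or p == c for p, c in zip(rx, sx))
-- ===== Notes on version B (the rewrite author's own statement) =====
-- stated objective: faster
-- what changed: Replaced recursive string slicing (which copies both strings at every step) with a single length check plus one zip pass over the characters.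
import Mathlib
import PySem

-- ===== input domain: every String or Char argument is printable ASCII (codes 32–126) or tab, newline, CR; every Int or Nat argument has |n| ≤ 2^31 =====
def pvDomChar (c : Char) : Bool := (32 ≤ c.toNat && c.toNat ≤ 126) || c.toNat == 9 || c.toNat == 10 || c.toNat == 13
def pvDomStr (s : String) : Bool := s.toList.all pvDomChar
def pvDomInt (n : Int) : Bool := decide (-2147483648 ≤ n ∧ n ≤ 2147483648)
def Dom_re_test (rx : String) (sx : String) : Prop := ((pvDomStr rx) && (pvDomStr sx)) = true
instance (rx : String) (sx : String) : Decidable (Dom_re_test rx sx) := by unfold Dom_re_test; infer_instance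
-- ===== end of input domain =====

-- ===== PORT A =====
-- A: recursion over both strings (ported over List Char, slicing = tail)
def reTestA : List Char → List Char → Bool
  | [], _ => true
  | _ :: _, [] => false
  | p :: ps, c :: cs => if p == c || p == '.' then reTestA ps cs else false

def re_test (rx : String) (sx : String) : Bool := reTestA rx.toList sx.toList

-- ===== PORT B =====
-- B: length check + one zip pass
def re_test_alt (rx : String) (sx : String) : Bool :=
  if rx.toList.length > sx.toList.length then false
  else (rx.toList.zip sx.toList).all (fun pc => pc.1 == '.' || pc.1 == pc.2)

-- ===== PRECONDITION & SPEC =====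
def Spec_re_test (rx : String) (sx : String) (out : Bool) : Prop := out = re_test_alt rx sx
instance (rx : String) (sx : String) (out : Bool) : Decidable (Spec_re_test rx sx out) := by unfold Spec_re_test; infer_instance

-- ===== CLAIM (what is proved, stated in full; the proofs are below) =====
def Claim_equal_re_test : Prop := ∀ (rx : String) (sx : String), Dom_re_test rx sx → Spec_re_test rx sx (re_test rx sx)

-- ===== LEMMAS AND PROOFS =====

-- ===== VERDICT (by name: the statement is the Claim_ definition above) =====
theorem reTestA_eq (ps cs : List Char) :
    reTestA ps cs =
      (decide (ps.length ≤ cs.length) &&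
        (ps.zip cs).all (fun pc => pc.1 == '.' || pc.1 == pc.2)) := by
  induction ps generalizing cs with
  | nil => simp [reTestA]
  | cons p ps ih =>
    cases cs with
    | nil => simp [reTestA]
    | cons c cs =>
      simp only [reTestA, List.zip_cons_cons, List.all_cons, List.length_cons]
      by_cases h : (p == c || p == '.') = true
      · rw [if_pos h, ih]
        have h' : (p == '.' || p == c) = true := by
          rcases Bool.or_eq_true_iff.mp h with h1 | h1 <;> simp_all
        simp [h']
      · rw [if_neg h]
        have h' : (p == '.' || p == c) = false := by
          rcases Bool.or_eq_false_iff.mp (Bool.not_eq_true _ |>.mp h) with ⟨h1, h2⟩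
          simp_all
        simp [h']

theorem re_test_spec : Claim_equal_re_test := by
  intro rx sx _
  unfold Spec_re_test re_test re_test_alt
  rw [reTestA_eq]
  by_cases h : sx.toList.length < rx.toList.length
  · rw [if_pos h]
    have hd : decide (rx.toList.length ≤ sx.toList.length) = false := by
      simp only [decide_eq_false_iff_not]; omega
    rw [hd, Bool.false_and]
  · rw [if_neg h]
    have hd : decide (rx.toList.length ≤ sx.toList.length) = true := by
      simp only [decide_eq_true_eq]; omega
    rw [hd, Bool.true_and]
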